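-- pv_equiv track=rewrite | github.com/jeetsukumaran/piikun | src/piikun/parsebpp_old.py | extract_bpp_output_posterior_guide_tree_string
-- ===== SOURCE A (Python) =====
-- def extract_bpp_output_posterior_guide_tree_string(source_text):
--     # pretty dumb logic for now: just locates the last non-blank line
--     # works with: bp&p Version 3.1, April 2015, in "10" mode, i.e. infer species delimitation with guide tree.
--     lines = source_text.split("\n")
--     result = None
--     for idx, line in enumerate(lines[-1::-1]):
--         if line:
--             result = line
--             break
--     return result
-- ===== SOURCE B (Python) =====
-- def extract_bpp_output_posterior_guide_tree_string(source_text):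
--     # Strip leading/trailing newline characters; the last line is then the
--     # segment after the last remaining "\n" (the whole string if none).
--     s2 = source_text.strip("\n")
--     if not s2:
--         return None
--     return s2[s2.rfind("\n") + 1:]
-- ===== Notes on version B (the rewrite author's own statement) =====
-- stated objective: simpler
-- what changed: Instead of splitting the whole text into a list of lines and scanning the reversed list for the first non-empty one, B strips newline characters from both ends and returns the segment after the last remaining newline found with rfind, building no line list.
import Mathlib
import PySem

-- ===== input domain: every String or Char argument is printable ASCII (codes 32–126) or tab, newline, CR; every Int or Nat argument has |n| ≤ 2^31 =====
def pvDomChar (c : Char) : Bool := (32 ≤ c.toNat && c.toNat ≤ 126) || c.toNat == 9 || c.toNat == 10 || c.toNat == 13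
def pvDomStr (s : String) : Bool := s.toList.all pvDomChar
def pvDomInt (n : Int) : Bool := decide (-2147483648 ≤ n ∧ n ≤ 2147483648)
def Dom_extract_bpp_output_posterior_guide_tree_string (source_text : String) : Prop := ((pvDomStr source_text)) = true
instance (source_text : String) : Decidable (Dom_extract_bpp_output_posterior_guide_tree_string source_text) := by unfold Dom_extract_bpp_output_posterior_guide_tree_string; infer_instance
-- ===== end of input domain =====

-- B replaces A's split-into-a-list-of-lines + reversed scan by strip("\n") + rfind("\n") on the string itself.

-- ===== PORT A =====
-- the 'for idx, line in enumerate(lines[-1::-1]): if line: result = line; break' loop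
-- (result starts as None; the index idx is never used)
def pvLoopA : List (Int × String) → Option String
  | [] => none
  | (_, line) :: rest => if line ≠ "" then some line else pvLoopA rest

def extract_bpp_output_posterior_guide_tree_string (source_text : String) : Option String :=
  -- lines = source_text.split("\n"); the separator is the non-empty literal "\n", so Python cannot raise
  let lines : List String := (PySem.Chars.splitOn source_text.toList ['\n']).map String.ofList
  -- lines[-1::-1]; the step is the literal -1 ≠ 0, so the slice is defined and '.getD []' is never taken
  let rev : List String := (PySem.List.slice? lines (some (-1)) none (-1)).getD []
  pvLoopA (PySem.List.enumerate rev)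

-- ===== PORT B =====
def extract_bpp_output_posterior_guide_tree_string_alt (source_text : String) : Option String :=
  let s2 : String := PySem.Str.stripChars source_text "\n"   -- source_text.strip("\n")
  if s2 = "" then none
  else some (String.ofList (PySem.List.slice s2.toList (some (PySem.Str.rfind s2 "\n" + 1)) none))  -- s2[s2.rfind("\n")+1:]

-- ===== PRECONDITION & SPEC =====
def Spec_extract_bpp_output_posterior_guide_tree_string (source_text : String) (out : Option String) : Prop := out = extract_bpp_output_posterior_guide_tree_string_alt source_text
instance (source_text : String) (out : Option String) : Decidable (Spec_extract_bpp_output_posterior_guide_tree_string source_text out) := by unfold Spec_extract_bpp_output_posterior_guide_tree_string; infer_instance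

-- ===== CLAIM (what is proved, stated in full; the proofs are below) =====
def Claim_equal_extract_bpp_output_posterior_guide_tree_string : Prop := ∀ (source_text : String), Dom_extract_bpp_output_posterior_guide_tree_string source_text → Spec_extract_bpp_output_posterior_guide_tree_string source_text (extract_bpp_output_posterior_guide_tree_string source_text)

-- ===== LEMMAS AND PROOFS =====

-- the newline predicates used throughout
def pvP (c : Char) : Bool := c == '\n'
def pvQ (c : Char) : Bool := c != '\n'

-- reference recursive form of source_text.split("\n")
def pvSplit : List Char → List (List Char)
  | [] => [[]]
  | c :: rest =>
      if c = '\n' then [] :: pvSplit rest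
      else
        match pvSplit rest with
        | [] => [[c]]
        | h :: t => (c :: h) :: t

-- first non-empty element (char level)
def pvFirstC : List (List Char) → Option (List Char)
  | [] => none
  | l :: rest => if l ≠ [] then some l else pvFirstC rest

-- the closed form both ports are reduced to: drop trailing newlines, take the last line
def pvRef (cs : List Char) : Option (List Char) :=
  let u := cs.reverse.dropWhile pvP
  if u = [] then none else some ((u.takeWhile pvQ).reverse)

-- append a char to the last block of a line list
def pvSnocLast : List (List Char) → Char → List (List Char)
  | [], c => [[c]]
  | [l], c => [l ++ [c]]
  | l :: ls, c => l :: pvSnocLast ls c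

theorem pvSplit_ne_nil (cs : List Char) : pvSplit cs ≠ [] := by
  cases cs with
  | nil => simp [pvSplit]
  | cons c rest =>
    simp only [pvSplit]
    split
    · simp
    · split <;> simp

-- PySem.Chars.splitOn.go characterised against pvSplit
theorem pv_go_eq (fuel : Nat) : ∀ (l cur : List Char) (acc : List (List Char)), l.length < fuel →
    PySem.Chars.splitOn.go ['\n'] fuel l cur acc =
      acc.reverse ++ (match pvSplit l with
                      | [] => [cur.reverse]
                      | h :: t => (cur.reverse ++ h) :: t) := by
  induction fuel with
  | zero => intro l cur acc h; omega
  | succ f ih =>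
    intro l cur acc h
    cases l with
    | nil => simp [PySem.Chars.splitOn.go, pvSplit]
    | cons c rest =>
      rw [PySem.Chars.splitOn.go]
      by_cases hc : c = '\n'
      · subst hc
        rw [if_pos (by simp [List.isPrefixOf])]
        simp only [List.length_singleton, List.drop_succ_cons, List.drop_zero]
        rw [ih rest [] (cur.reverse :: acc) (by simpa using Nat.lt_of_succ_lt_succ h)]
        simp [pvSplit]
        cases hs : pvSplit rest with
        | nil => exact absurd hs (pvSplit_ne_nil rest)
        | cons h t => simp
      · rw [if_neg (by simp [List.isPrefixOf]; exact fun h => absurd h.symm hc)]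
        rw [ih rest (c :: cur) acc (by simpa using Nat.lt_of_succ_lt_succ h)]
        simp only [pvSplit, if_neg hc]
        cases hs : pvSplit rest with
        | nil => simp
        | cons h t => simp

theorem pv_splitOn_eq (cs : List Char) : PySem.Chars.splitOn cs ['\n'] = pvSplit cs := by
  rw [PySem.Chars.splitOn, pv_go_eq (cs.length + 1) cs [] [] (by omega)]
  cases hs : pvSplit cs with
  | nil => exact absurd hs (pvSplit_ne_nil cs)
  | cons h t => simp

-- the slice lines[-1::-1] is reversal
theorem pv_slice_neg_one {α : Type} (xs : List α) :
    PySem.List.slice? xs (some (-1)) none (-1) = some xs.reverse := by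
  rw [← PySem.List.slice?_none_none_neg_one xs]
  have h : PySem.List.sliceIndices xs.length (some (-1)) none (-1)
         = PySem.List.sliceIndices xs.length none none (-1) := by
    simp only [PySem.List.sliceIndices]
    norm_num
    omega
  simp only [PySem.List.slice?, h]

-- A's loop finds the first non-empty line
theorem pv_loopA_eq (ls : List (List Char)) (st : Int) :
    pvLoopA (PySem.List.enumerate (ls.map String.ofList) st) = Option.map String.ofList (pvFirstC ls) := by
  induction ls generalizing st with
  | nil => simp [PySem.List.enumerate_nil, pvLoopA, pvFirstC]
  | cons l rest ih =>
    simp only [List.map_cons, PySem.List.enumerate_cons, pvLoopA, pvFirstC]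
    by_cases hl : l = []
    · subst hl; simpa using ih (st + 1)
    · rw [if_pos (by simpa [String.ofList_eq_empty_iff] using hl), if_pos hl]
      rfl

-- A reduced to char level
theorem pv_A_char (s : String) :
    extract_bpp_output_posterior_guide_tree_string s
      = Option.map String.ofList (pvFirstC (pvSplit s.toList).reverse) := by
  unfold extract_bpp_output_posterior_guide_tree_string
  simp only [pv_splitOn_eq, pv_slice_neg_one, Option.getD_some, ← List.map_reverse]
  exact pv_loopA_eq _ 0

-- rfind lemmas
theorem pv_neg_one_le_go (s sub : List Char) (j : Nat) : -1 ≤ PySem.Chars.rfind.go s sub j := by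
  induction j with
  | zero => rw [PySem.Chars.rfind.go]; split <;> omega
  | succ j ih =>
    rw [PySem.Chars.rfind.go]
    split
    · omega
    · exact ih

theorem pv_go_le (s sub : List Char) (j : Nat) : PySem.Chars.rfind.go s sub j ≤ (j : Int) := by
  induction j with
  | zero => rw [PySem.Chars.rfind.go]; split <;> omega
  | succ j ih =>
    rw [PySem.Chars.rfind.go]
    split
    · push_cast; omega
    · push_cast; omega

theorem pv_rfind_lt_length (t : List Char) : PySem.Chars.rfind t ['\n'] < (t.length : Int) := by
  rw [PySem.Chars.rfind]
  cases ht : t.length with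
  | zero =>
    rw [PySem.Chars.rfind.go]
    have : t = [] := List.length_eq_zero_iff.mp ht
    subst this
    simp [List.isPrefixOf]
  | succ m =>
    rw [PySem.Chars.rfind.go]
    rw [if_neg (by rw [← ht, List.drop_length]; simp [List.isPrefixOf])]
    have := pv_go_le t ['\n'] m
    push_cast
    omega

theorem pv_prefix_snoc (t : List Char) (c : Char) (hc : c ≠ '\n') :
    ['\n'].isPrefixOf (t ++ [c]) = ['\n'].isPrefixOf t := by
  cases t with
  | nil => simp [List.isPrefixOf]; exact fun h => absurd h.symm hc
  | cons a r => simp [List.isPrefixOf]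

theorem pv_go_snoc (t : List Char) (c : Char) (hc : c ≠ '\n') :
    ∀ j : Nat, j ≤ t.length → PySem.Chars.rfind.go (t ++ [c]) ['\n'] j = PySem.Chars.rfind.go t ['\n'] j := by
  intro j
  induction j with
  | zero =>
    intro _
    rw [PySem.Chars.rfind.go, PySem.Chars.rfind.go, pv_prefix_snoc t c hc]
  | succ j ih =>
    intro hj
    rw [PySem.Chars.rfind.go, PySem.Chars.rfind.go]
    rw [List.drop_append_of_le_length hj, pv_prefix_snoc _ c hc]
    rw [ih (by omega)]

theorem pv_rfind_snoc_nl (t : List Char) : PySem.Chars.rfind (t ++ ['\n']) ['\n'] = (t.length : Int) := by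
  rw [PySem.Chars.rfind]
  simp only [List.length_append, List.length_cons, List.length_nil]
  rw [PySem.Chars.rfind.go]
  rw [if_neg (by rw [show t.length + 1 = (t ++ ['\n']).length by simp, List.drop_length]; simp [List.isPrefixOf])]
  cases ht : t.length with
  | zero =>
    have : t = [] := List.length_eq_zero_iff.mp ht
    subst this
    rw [PySem.Chars.rfind.go]
    simp [List.isPrefixOf]
  | succ m =>
    rw [PySem.Chars.rfind.go]
    rw [if_pos (by
      rw [show m + 1 = t.length from ht.symm, List.drop_append_of_le_length le_rfl, List.drop_length]
      simp [List.isPrefixOf])]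

theorem pv_rfind_snoc (t : List Char) (c : Char) (hc : c ≠ '\n') :
    PySem.Chars.rfind (t ++ [c]) ['\n'] = PySem.Chars.rfind t ['\n'] := by
  rw [PySem.Chars.rfind, PySem.Chars.rfind]
  simp only [List.length_append, List.length_cons, List.length_nil]
  rw [PySem.Chars.rfind.go]
  rw [if_neg (by rw [show t.length + 1 = (t ++ [c]).length by simp, List.drop_length]; simp [List.isPrefixOf])]
  exact pv_go_snoc t c hc t.length le_rfl

theorem pv_neg_one_le_rfind (s : List Char) : -1 ≤ PySem.Chars.rfind s ['\n'] :=
  pv_neg_one_le_go s ['\n'] s.length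

-- the segment after the last '\n'
theorem pv_drop_rfind (s : List Char) :
    List.drop (PySem.Chars.rfind s ['\n'] + 1).toNat s = (s.reverse.takeWhile pvQ).reverse := by
  induction s using List.reverseRecOn with
  | nil => decide
  | append_singleton t c ih =>
    by_cases hc : c = '\n'
    · subst hc
      rw [pv_rfind_snoc_nl]
      rw [show ((t.length : Int) + 1).toNat = t.length + 1 by omega]
      rw [show t.length + 1 = (t ++ ['\n']).length by simp, List.drop_length]
      simp [pvQ]
    · rw [pv_rfind_snoc t c hc]
      have h1 := pv_rfind_lt_length t
      have h2 := pv_neg_one_le_rfind t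
      rw [List.drop_append_of_le_length (by omega)]
      rw [ih]
      simp [pvQ, hc]

-- stripping leading newlines first changes neither emptiness nor the last line
theorem pv_takeQ_of_allP (a : List Char) (ha : ∀ x ∈ a, pvP x = true) : a.takeWhile pvQ = [] := by
  cases a with
  | nil => rfl
  | cons x r =>
    rw [List.takeWhile_cons]
    have := ha x (by simp)
    simp only [pvP, beq_iff_eq] at this
    simp [pvQ, this]

theorem pv_drop_rev (l : List Char) (hm : l.dropWhile pvP ≠ []) :
    l.reverse.dropWhile pvP = (l.dropWhile pvP).reverse.dropWhile pvP ++ (l.takeWhile pvP).reverse := by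
  conv_lhs => rw [← List.takeWhile_append_dropWhile (p := pvP) (l := l)]
  rw [List.reverse_append, List.dropWhile_append]
  rw [if_neg ?_]
  rw [List.isEmpty_iff]
  intro hnil
  rw [List.dropWhile_eq_nil_iff] at hnil
  have hhead := List.head_dropWhile_not pvP hm
  exact absurd (hnil _ (by rw [List.mem_reverse]; exact List.head_mem hm)) (by simp [hhead])

theorem pv_dropdrop_ne (l : List Char) (hm : l.dropWhile pvP ≠ []) :
    (l.dropWhile pvP).reverse.dropWhile pvP ≠ [] := by
  intro hall
  rw [List.dropWhile_eq_nil_iff] at hall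
  have hhead := List.head_dropWhile_not pvP hm
  exact absurd (hall _ (by rw [List.mem_reverse]; exact List.head_mem hm)) (by simp [hhead])

theorem pv_front_nil (l : List Char) :
    ((l.dropWhile pvP).reverse.dropWhile pvP = [] ↔ l.reverse.dropWhile pvP = []) := by
  by_cases hm : l.dropWhile pvP = []
  · rw [hm]
    simp only [List.reverse_nil, List.dropWhile_nil, true_iff]
    rw [List.dropWhile_eq_nil_iff]
    intro x hx
    rw [List.mem_reverse] at hx
    rw [List.dropWhile_eq_nil_iff] at hm
    exact hm x hx
  · rw [pv_drop_rev l hm]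
    simp [List.append_eq_nil_iff, pv_dropdrop_ne l hm]

theorem pv_front_take (l : List Char) :
    ((l.dropWhile pvP).reverse.dropWhile pvP).takeWhile pvQ = (l.reverse.dropWhile pvP).takeWhile pvQ := by
  by_cases hm : l.dropWhile pvP = []
  · have h1 : l.reverse.dropWhile pvP = [] := (pv_front_nil l).mp (by rw [hm]; rfl)
    rw [hm, h1]; rfl
  · rw [pv_drop_rev l hm, List.takeWhile_append]
    split
    · next hlen =>
      rw [pv_takeQ_of_allP _ (fun x hx => List.mem_takeWhile_imp (List.mem_reverse.mp hx))]
      rw [List.append_nil]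
      exact (List.takeWhile_sublist _).eq_of_length hlen
    · rfl

-- B reduced to char level
theorem pv_contains_eq : (fun c => List.contains ['\n'] c) = pvP := by
  funext c
  by_cases h : c = '\n' <;> simp [pvP, h]

theorem pv_strip_toList (s : String) :
    (PySem.Str.stripChars s "\n").toList
      = ((s.toList.dropWhile pvP).reverse.dropWhile pvP).reverse := by
  rw [PySem.Str.toList_stripChars, PySem.Chars.stripChars]
  rw [show "\n".toList = ['\n'] by decide]
  rw [pv_contains_eq]

theorem pv_B_char (s : String) :
    extract_bpp_output_posterior_guide_tree_string_alt s = Option.map String.ofList (pvRef s.toList) := by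
  unfold extract_bpp_output_posterior_guide_tree_string_alt pvRef
  by_cases h : s.toList.reverse.dropWhile pvP = []
  · rw [if_pos (by
      rw [← String.toList_eq_nil_iff, pv_strip_toList]
      simp [(pv_front_nil s.toList).mpr h])]
    rw [if_pos h]
    rfl
  · rw [if_neg (fun heq => h ((pv_front_nil s.toList).mp (by
      rw [← String.toList_eq_nil_iff, pv_strip_toList] at heq
      simpa using heq)))]
    rw [if_neg h]
    rw [PySem.Str.rfind_eq, show "\n".toList = ['\n'] by decide]
    rw [PySem.List.slice_from _ (by have := pv_neg_one_le_go (PySem.Str.stripChars s "\n").toList ['\n'] (PySem.Str.stripChars s "\n").toList.length; rw [PySem.Chars.rfind]; omega)]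
    rw [pv_drop_rfind]
    rw [pv_strip_toList, List.reverse_reverse, pv_front_take]
    rfl

-- structure of pvSplit under snoc
theorem pv_split_snoc_nl (t : List Char) : pvSplit (t ++ ['\n']) = pvSplit t ++ [[]] := by
  induction t with
  | nil => rfl
  | cons a r ih =>
    by_cases ha : a = '\n'
    · subst ha
      simp [pvSplit, ih]
    · simp only [List.cons_append, pvSplit, if_neg ha, ih]
      cases hs : pvSplit r with
      | nil => exact absurd hs (pvSplit_ne_nil r)
      | cons h ts => simp

theorem pv_split_snoc (t : List Char) (c : Char) (hc : c ≠ '\n') :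
    pvSplit (t ++ [c]) = pvSnocLast (pvSplit t) c := by
  induction t with
  | nil => simp [pvSplit, pvSnocLast, if_neg hc]
  | cons a r ih =>
    by_cases ha : a = '\n'
    · subst ha
      simp only [List.cons_append, pvSplit, ih]
      cases hs : pvSplit r with
      | nil => exact absurd hs (pvSplit_ne_nil r)
      | cons h ts =>
        cases ts with
        | nil => rfl
        | cons x xs => rfl
    · simp only [List.cons_append, pvSplit, if_neg ha, ih]
      cases hs : pvSplit r with
      | nil => exact absurd hs (pvSplit_ne_nil r)
      | cons h ts =>
        cases ts with
        | nil => rfl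
        | cons x xs => rfl

theorem pv_snocLast_eq (ls : List (List Char)) (c : Char) :
    pvSnocLast ls c = ls.dropLast ++ [ls.getLastD [] ++ [c]] := by
  induction ls with
  | nil => rfl
  | cons l ls ih =>
    cases ls with
    | nil => rfl
    | cons x xs => simp [pvSnocLast, ih]

-- the last line of the split
theorem pv_last_line (t : List Char) :
    (pvSplit t).getLastD [] = (t.reverse.takeWhile pvQ).reverse := by
  induction t using List.reverseRecOn with
  | nil => rfl
  | append_singleton t c ih =>
    by_cases hc : c = '\n'
    · subst hc
      rw [pv_split_snoc_nl]
      simp [pvQ]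
    · rw [pv_split_snoc t c hc, pv_snocLast_eq, List.getLastD_concat]
      simp only [List.reverse_append, List.reverse_cons, List.reverse_nil, List.nil_append,
        List.singleton_append, List.takeWhile_cons]
      rw [if_pos (by simp [pvQ, hc])]
      rw [List.reverse_cons, ih]

theorem pv_ref_snoc_nl (t : List Char) : pvRef (t ++ ['\n']) = pvRef t := by
  simp only [pvRef, List.reverse_append, List.reverse_cons, List.reverse_nil, List.nil_append,
    List.singleton_append, List.dropWhile_cons]
  rw [show pvP '\n' = true from rfl, if_pos rfl]

-- the central equality of the two closed forms
theorem pv_main (cs : List Char) : pvFirstC (pvSplit cs).reverse = pvRef cs := by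
  induction cs using List.reverseRecOn with
  | nil => rfl
  | append_singleton t c ih =>
    by_cases hc : c = '\n'
    · subst hc
      rw [pv_split_snoc_nl, pv_ref_snoc_nl]
      simp only [List.reverse_append, List.reverse_cons, List.reverse_nil, List.nil_append,
        List.singleton_append]
      rw [show pvFirstC ([] :: (pvSplit t).reverse) = pvFirstC (pvSplit t).reverse by simp [pvFirstC]]
      exact ih
    · rw [pv_split_snoc t c hc, pv_snocLast_eq]
      simp only [List.reverse_append, List.reverse_cons, List.reverse_nil, List.nil_append,
        List.singleton_append, pvFirstC]
      rw [if_pos (by simp)]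
      rw [pv_last_line]
      simp only [pvRef, List.reverse_append, List.reverse_cons, List.reverse_nil, List.nil_append,
        List.singleton_append, List.dropWhile_cons]
      rw [show pvP c = false by simp [pvP, hc]]
      simp only [Bool.false_eq_true, if_false]
      rw [if_neg (by simp)]
      simp only [List.takeWhile_cons]
      rw [show pvQ c = true by simp [pvQ, hc], if_pos rfl]
      simp

-- ===== VERDICT (by name: the statement is the Claim_ definition above) =====
theorem extract_bpp_output_posterior_guide_tree_string_spec : Claim_equal_extract_bpp_output_posterior_guide_tree_string := by
  intro s _
  show _ = _
  rw [pv_A_char, pv_B_char, pv_main]
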